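-- pv_equiv track=rewrite | github.com/littlezhe001/SAT-Search | FBC/3输入异或方法/searchwiththree.py | CountClausesInSequentialEncoding
-- ===== SOURCE A (Python) =====
-- def CountClausesInSequentialEncoding(main_var_num, cardinalitycons, clause_num):  # 计算子句在序列编码中的数量   对应着11页的公式
--     count = clause_num
--     n = main_var_num  # S盒的总数
--     k = cardinalitycons  # 活跃S盒的上界
--     m = n - k
--     if (k > 0):
--         count += 1
--         for i in range(1, n - 1):
--             count += 2
--
--         for i in range(k, n - 1):
--             count += 1
--         for i in range(1, n - 1):
--             if i < k:
--                 for j in range(1, i):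
--                     count += 2
--                 count += 1
--             else:
--                 for j in range(1, k):
--                     count += 2
--         count += 1
--     if (k == 0):
--         for i in range(n):
--             count += 1
--     return count
-- ===== SOURCE B (Python) =====
-- def CountClausesInSequentialEncoding(main_var_num, cardinalitycons, clause_num):
--     n = main_var_num
--     k = cardinalitycons
--     if k < 0:
--         return clause_num
--     if k == 0:
--         return clause_num + max(0, n)
--     t = max(0, n - 2)                 # iterations of each range(1, n-1) loop
--     c = max(0, min(n - 2, k - 1))     # iterations with i < k in the mixed loop
--     # sum of (2*(i-1)+1) over the first c values of i is c*c
--     return clause_num + 2 + 2 * t + max(0, n - 1 - k) + c * c + 2 * (k - 1) * (t - c)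
-- ===== Notes on version B (the rewrite author's own statement) =====
-- stated objective: faster
-- what changed: Replaced A's nested counting loops (O(n*k) iterations) by a closed-form arithmetic formula computed in O(1), using that the mixed inner loop contributes c^2 + 2(k-1)(t-c) for c = clamp(min(n-2,k-1)) and t = max(0,n-2).
import Mathlib
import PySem

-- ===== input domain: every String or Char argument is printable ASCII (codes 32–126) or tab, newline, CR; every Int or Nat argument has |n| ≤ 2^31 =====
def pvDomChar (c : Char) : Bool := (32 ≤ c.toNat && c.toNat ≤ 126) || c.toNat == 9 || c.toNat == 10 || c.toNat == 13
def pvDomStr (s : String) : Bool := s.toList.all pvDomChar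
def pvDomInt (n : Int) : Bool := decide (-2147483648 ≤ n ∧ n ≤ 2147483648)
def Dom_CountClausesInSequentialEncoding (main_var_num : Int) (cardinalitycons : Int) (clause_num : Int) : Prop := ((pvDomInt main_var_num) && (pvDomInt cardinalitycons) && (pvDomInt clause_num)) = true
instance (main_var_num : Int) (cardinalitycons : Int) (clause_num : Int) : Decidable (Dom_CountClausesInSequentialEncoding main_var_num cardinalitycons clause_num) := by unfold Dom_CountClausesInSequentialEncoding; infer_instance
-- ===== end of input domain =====

-- B replaces A's nested counting loops by a closed-form O(1) arithmetic formula (objective: faster).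

-- ===== PORT A =====
-- the body of A's third loop over i in range(1, n-1)
def pvInnerA (k : Int) (c : Int) (i : Int) : Int :=
  if i < k then ((PySem.List.pyRange 1 i 1).foldl (fun c _ => c + 2) c) + 1
  else (PySem.List.pyRange 1 k 1).foldl (fun c _ => c + 2) c

def CountClausesInSequentialEncoding (main_var_num : Int) (cardinalitycons : Int) (clause_num : Int) : Int :=
  let count := clause_num
  let n := main_var_num
  let k := cardinalitycons
  if k > 0 then
    let count := count + 1
    let count := (PySem.List.pyRange 1 (n-1) 1).foldl (fun c _ => c + 2) count
    let count := (PySem.List.pyRange k (n-1) 1).foldl (fun c _ => c + 1) count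
    let count := (PySem.List.pyRange 1 (n-1) 1).foldl (pvInnerA k) count
    count + 1
  else if k = 0 then
    (PySem.List.pyRange 0 n 1).foldl (fun c _ => c + 1) count
  else count

-- ===== PORT B =====
def CountClausesInSequentialEncoding_alt (main_var_num : Int) (cardinalitycons : Int) (clause_num : Int) : Int :=
  let n := main_var_num
  let k := cardinalitycons
  if k < 0 then clause_num
  else if k = 0 then clause_num + max 0 n
  else
    let t := max 0 (n - 2)
    let c := max 0 (min (n - 2) (k - 1))
    clause_num + 2 + 2 * t + max 0 (n - 1 - k) + c * c + 2 * (k - 1) * (t - c)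

-- ===== PRECONDITION & SPEC =====
def Spec_CountClausesInSequentialEncoding (main_var_num : Int) (cardinalitycons : Int) (clause_num : Int) (out : Int) : Prop := out = CountClausesInSequentialEncoding_alt main_var_num cardinalitycons clause_num
instance (main_var_num : Int) (cardinalitycons : Int) (clause_num : Int) (out : Int) : Decidable (Spec_CountClausesInSequentialEncoding main_var_num cardinalitycons clause_num out) := by unfold Spec_CountClausesInSequentialEncoding; infer_instance

-- ===== CLAIM (what is proved, stated in full; the proofs are below) =====
def Claim_equal_CountClausesInSequentialEncoding : Prop := ∀ (main_var_num : Int) (cardinalitycons : Int) (clause_num : Int), Dom_CountClausesInSequentialEncoding main_var_num cardinalitycons clause_num → Spec_CountClausesInSequentialEncoding main_var_num cardinalitycons clause_num (CountClausesInSequentialEncoding main_var_num cardinalitycons clause_num)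

-- ===== LEMMAS AND PROOFS =====

theorem pv_foldl_const (l : List Int) (a : Int) : ∀ init : Int, l.foldl (fun c _ => c + a) init = init + a * l.length := by
  induction l with
  | nil => intro init; simp
  | cons x xs ih => intro init; simp only [List.foldl, ih, List.length_cons]; push_cast; ring

-- closed-form value added by A's third loop, run over i ∈ range(1, m)
def pvF (k m : Int) : Int :=
  (max 0 (min (m - 1) (k - 1))) * (max 0 (min (m - 1) (k - 1)))
    + 2 * (k - 1) * (max 0 (m - 1) - max 0 (min (m - 1) (k - 1)))

theorem pv_loop (k : Int) (hk : 0 < k) : ∀ (N : ℕ) (init : Int),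
    (PySem.List.pyRange 1 (1 + (N : Int)) 1).foldl (pvInnerA k) init = init + pvF k (1 + N) := by
  intro N
  induction N with
  | zero =>
    intro init
    rw [show ((1 : Int) + ((0 : ℕ) : Int)) = 1 by norm_num,
        PySem.List.pyRange_one_eq_nil (le_refl 1)]
    have h1 : max 0 (min ((1:Int) - 1) (k - 1)) = 0 := by omega
    have h2 : max (0:Int) (1 - 1) = 0 := by omega
    simp [pvF, h1, h2, List.foldl]
  | succ N ih =>
    intro init
    have hcast : ((1 : Int) + ((N + 1 : ℕ) : Int)) = (1 + (N : Int)) + 1 := by push_cast; ring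
    rw [hcast, PySem.List.pyRange_one_succ_right (by omega), List.foldl_append, ih]
    simp only [List.foldl]
    unfold pvInnerA
    split_ifs with h
    · -- i = 1 + N < k
      rw [pv_foldl_const, PySem.List.length_pyRange_one]
      have hlen : (((1 + (N : Int) - 1).toNat : ℕ) : Int) = N := by omega
      rw [hlen]
      have hc1 : max 0 (min ((1 + (N : Int)) - 1) (k - 1)) = N := by omega
      have hc2 : max 0 (min ((1 + (N : Int) + 1) - 1) (k - 1)) = 1 + N := by omega
      have ht1 : max 0 ((1 + (N : Int)) - 1) = N := by omega
      have ht2 : max 0 ((1 + (N : Int) + 1) - 1) = 1 + N := by omega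
      simp only [pvF, hc1, hc2, ht1, ht2]
      ring
    · -- i = 1 + N ≥ k
      rw [pv_foldl_const, PySem.List.length_pyRange_one]
      have hlen : (((k - 1).toNat : ℕ) : Int) = k - 1 := by omega
      rw [hlen]
      have hc1 : max 0 (min ((1 + (N : Int)) - 1) (k - 1)) = k - 1 := by omega
      have hc2 : max 0 (min ((1 + (N : Int) + 1) - 1) (k - 1)) = k - 1 := by omega
      have ht1 : max 0 ((1 + (N : Int)) - 1) = N := by omega
      have ht2 : max 0 ((1 + (N : Int) + 1) - 1) = 1 + N := by omega
      simp only [pvF, hc1, hc2, ht1, ht2]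
      ring

theorem CountClausesInSequentialEncoding_spec : Claim_equal_CountClausesInSequentialEncoding := by
  unfold Claim_equal_CountClausesInSequentialEncoding
  intro n k cl _
  unfold Spec_CountClausesInSequentialEncoding
  unfold CountClausesInSequentialEncoding CountClausesInSequentialEncoding_alt
  rcases lt_trichotomy k 0 with hk | hk | hk
  · simp [not_lt.mpr (le_of_lt hk), hk, ne_of_lt hk]
  · subst hk
    simp only [lt_irrefl, reduceIte]
    rw [pv_foldl_const, PySem.List.length_pyRange_one]
    omega
  · rw [if_pos hk, if_neg (by omega : ¬ k < 0), if_neg (by omega : ¬ k = 0)]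
    simp only []
    rw [pv_foldl_const, pv_foldl_const, PySem.List.length_pyRange_one, PySem.List.length_pyRange_one]
    by_cases hn : 2 ≤ n
    · have hN : n - 1 = 1 + (((n - 2).toNat : ℕ) : Int) := by omega
      rw [hN, pv_loop k hk]
      have hm : (1 + (((n - 2).toNat : ℕ) : Int)) = n - 1 := by omega
      rw [hm]
      unfold pvF
      have e1 : n - 1 - 1 = n - 2 := by ring
      rw [e1]
      have e2 : (((n - 2).toNat : ℕ) : Int) = max 0 (n - 2) := by omega
      have e3 : (((n - 1 - k).toNat : ℕ) : Int) = max 0 (n - 1 - k) := by omega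
      rw [e2, e3]
      generalize max 0 (min (n - 2) (k - 1)) * max 0 (min (n - 2) (k - 1)) = q
      omega
    · -- n < 2: the loops over range(1, n-1) are empty
      rw [PySem.List.pyRange_one_eq_nil (by omega : n - 1 ≤ 1)]
      simp only [List.foldl]
      have hc : max 0 (min (n - 2) (k - 1)) = 0 := by omega
      have ht : max (0:Int) (n - 2) = 0 := by omega
      rw [hc, ht]
      omega
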